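-- pv_equiv track=rewrite | github.com/Puddin1066/SalesGPT | scripts/zoho_crm_populate_from_data.py | _csv_description
-- ===== SOURCE A (Python) =====
-- from typing import Any, Dict, List, Optional, Set, Tuple
--
-- def _csv_description(row: Dict[str, str]) -> str:
--     lines: List[str] = []
--     order = [
--         "vertical",
--         "agency_name",
--         "website",
--         "notes",
--         "hq_region",
--         "leadership_snapshot",
--         "portfolio_public_hooks",
--         "core_services_tagged",
--         "ai_geo_answer_engine_signals",
--         "gemflush_outreach_angle",
--         "wikidata_knowledge_graph_angle",
--         "enrichment_source_date",
--     ]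
--     for k in order:
--         v = (row.get(k) or "").strip()
--         if v:
--             label = k.replace("_", " ").title()
--             lines.append(f"{label}: {v}")
--     for k, v in sorted(row.items()):
--         if k in order or not (v or "").strip():
--             continue
--         lines.append(f"{k}: {(v or '').strip()}")
--     return "\n".join(lines)[:65000]
-- ===== SOURCE B (Python) =====
-- def _csv_description(row):
--     order = [
--         "vertical",
--         "agency_name",
--         "website",
--         "notes",
--         "hq_region",
--         "leadership_snapshot",
--         "portfolio_public_hooks",
--         "core_services_tagged",
--         "ai_geo_answer_engine_signals",
--         "gemflush_outreach_angle",
--         "wikidata_knowledge_graph_angle",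
--         "enrichment_source_date",
--     ]
--     pos = {k: i for i, k in enumerate(order)}
--     entries = []
--     for k, v in row.items():
--         s = (v or "").strip()
--         if not s:
--             continue
--         i = pos.get(k)
--         if i is None:
--             entries.append(((len(order), k), f"{k}: {s}"))
--         else:
--             entries.append(((i, ""), f"{k.replace('_', ' ').title()}: {s}"))
--     entries.sort(key=lambda e: e[0])
--     return "\n".join(e[1] for e in entries)[:65000]
-- ===== Notes on version B (the rewrite author's own statement) =====
-- stated objective: alternative
-- what changed: A builds the output in two separate passes (a scan over the fixed label order with dict lookups, then a second scan over sorted(row.items())); B makes one pass over the row collecting ((priority, key), line) entries and does a single stable sort on that composite key.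
import Mathlib
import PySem

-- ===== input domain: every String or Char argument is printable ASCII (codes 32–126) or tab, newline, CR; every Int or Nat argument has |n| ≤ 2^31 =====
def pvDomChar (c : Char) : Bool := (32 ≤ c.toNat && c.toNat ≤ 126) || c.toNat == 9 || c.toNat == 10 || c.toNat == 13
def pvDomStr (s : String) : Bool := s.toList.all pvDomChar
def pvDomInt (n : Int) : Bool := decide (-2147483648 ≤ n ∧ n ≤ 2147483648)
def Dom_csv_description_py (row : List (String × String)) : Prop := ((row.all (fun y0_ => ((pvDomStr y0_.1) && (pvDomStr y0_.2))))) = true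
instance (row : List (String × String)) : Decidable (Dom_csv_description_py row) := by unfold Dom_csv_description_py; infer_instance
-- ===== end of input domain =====

-- B replaces A's two output passes (fixed-order scan with dict lookups, then a second
-- scan over the sorted remaining items) by ONE pass over the row that tags each kept
-- line with a (priority, key) sort key, followed by a single stable sort (objective:
-- alternative decomposition, no speed claim).

-- ===== PORT A =====
-- the fixed label order (module constant of the Python function)
def pvOrder : List String :=
  [ "vertical", "agency_name", "website", "notes", "hq_region",
    "leadership_snapshot", "portfolio_public_hooks", "core_services_tagged",
    "ai_geo_answer_engine_signals", "gemflush_outreach_angle",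
    "wikidata_knowledge_graph_angle", "enrichment_source_date" ]

-- str.title() for ASCII text: an alphabetic char is uppercased after a non-alphabetic
-- char and lowercased otherwise (exact for the printable-ASCII domain; Python's notion
-- of 'cased' coincides with isalpha there)
def pvTitleChars : List Char → Bool → List Char
  | [], _ => []
  | c :: cs, prevAlpha =>
    (if PySem.Chars.isalpha c then
        (if prevAlpha then PySem.Chars.lowerChar c else PySem.Chars.upperChar c)
      else c) :: pvTitleChars cs (PySem.Chars.isalpha c)

-- k.replace("_", " ").title()
def pvLabel (k : String) : String :=
  String.ofList (pvTitleChars (PySem.Str.replace k "_" " ").toList false)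

def csv_description_py (row : List (String × String)) : String :=
  let d := PySem.Dict.ofList row
  let lines : List String := []
  -- for k in order: v = (row.get(k) or "").strip(); if v: lines.append(label + ": " + v)
  let lines := pvOrder.foldl (fun lines k =>
      let v := PySem.Str.strip (d.getD k "")
      if v ≠ "" then lines ++ [pvLabel k ++ ": " ++ v] else lines) lines
  -- for k, v in sorted(row.items()): if k in order or not v.strip(): continue; append
  let lines := (PySem.List.sorted2 d.items Prod.fst Prod.snd).foldl (fun lines kv =>
      if kv.1 ∈ pvOrder ∨ PySem.Str.strip kv.2 = "" then lines
      else lines ++ [kv.1 ++ ": " ++ PySem.Str.strip kv.2]) lines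
  PySem.Str.slice (PySem.Str.join "\n" lines) none (some 65000)

-- ===== PORT B =====
def csv_description_py_alt (row : List (String × String)) : String :=
  let d := PySem.Dict.ofList row
  -- pos = {k: i for i, k in enumerate(order)}
  let pos : PySem.Dict String Int :=
    PySem.Dict.ofList ((PySem.List.enumerate pvOrder).map (fun p => (p.2, p.1)))
  -- one pass: collect ((priority, tiebreak), line) for every nonempty stripped value
  let entries := d.items.foldl (fun es kv =>
      let s := PySem.Str.strip kv.2
      if s = "" then es
      else
        match pos.get? kv.1 with
        | none => es ++ [(((pvOrder.length : Int), kv.1), kv.1 ++ ": " ++ s)]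
        | some i => es ++ [((i, ""), pvLabel kv.1 ++ ": " ++ s)]) []
  -- entries.sort(key=lambda e: e[0]) — stable sort on the (Int, String) key
  let entries := PySem.List.sorted2 entries (fun e => e.1.1) (fun e => e.1.2)
  PySem.Str.slice (PySem.Str.join "\n" (entries.map (fun e => e.2))) none (some 65000)

-- ===== PRECONDITION & SPEC =====
def Spec_csv_description_py (row : List (String × String)) (out : String) : Prop := out = csv_description_py_alt row
instance (row : List (String × String)) (out : String) : Decidable (Spec_csv_description_py row out) := by unfold Spec_csv_description_py; infer_instance

-- ===== CLAIM (what is proved, stated in full; the proofs are below) =====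
def Claim_equal_csv_description_py : Prop := ∀ (row : List (String × String)), Dom_csv_description_py row → Spec_csv_description_py row (csv_description_py row)

-- ===== LEMMAS AND PROOFS =====

-- the (priority, tiebreak) dict of B, and the per-element Option functions the loops amount to
def pvPos : PySem.Dict String Int :=
  PySem.Dict.ofList ((PySem.List.enumerate pvOrder).map (fun p => (p.2, p.1)))

def pvEntry (kv : String × String) :
    Option ((Int × String) × String) :=
  if PySem.Str.strip kv.2 = "" then none
  else
    match pvPos.get? kv.1 with
    | none => some (((pvOrder.length : Int), kv.1), kv.1 ++ ": " ++ PySem.Str.strip kv.2)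
    | some i => some ((i, ""), pvLabel kv.1 ++ ": " ++ PySem.Str.strip kv.2)

def pvLine1 (d : PySem.Dict String String) (k : String) : Option String :=
  if PySem.Str.strip (d.getD k "") = "" then none
  else some (pvLabel k ++ ": " ++ PySem.Str.strip (d.getD k ""))

def pvGOrd (d : PySem.Dict String String) (p : Int × String) : Option ((Int × String) × String) :=
  if PySem.Str.strip (d.getD p.2 "") = "" then none
  else some ((p.1, ""), pvLabel p.2 ++ ": " ++ PySem.Str.strip (d.getD p.2 ""))

def pvLine2 (kv : String × String) : Option String :=
  if kv.1 ∈ pvOrder ∨ PySem.Str.strip kv.2 = "" then none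
  else some (kv.1 ++ ": " ++ PySem.Str.strip kv.2)

def pvGOth (kv : String × String) : Option ((Int × String) × String) :=
  if kv.1 ∈ pvOrder ∨ PySem.Str.strip kv.2 = "" then none
  else some (((pvOrder.length : Int), kv.1), kv.1 ++ ": " ++ PySem.Str.strip kv.2)

def pvKey (e : (Int × String) × String) : Lex (Int × String) := toLex (e.1.1, e.1.2)

-- an append-one-or-nothing loop is a filterMap
theorem pvFoldlOpt {α β : Type} (f : α → Option β) (step : List β → α → List β)
    (h : ∀ es x, step es x = es ++ (f x).toList) :
    ∀ (l : List α) (init : List β), l.foldl step init = init ++ l.filterMap f := by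
  intro l
  induction l with
  | nil => simp
  | cons x xs ih =>
    intro init
    rw [List.foldl_cons, ih, h, List.filterMap_cons]
    cases hx : f x <;> simp

theorem pvFilterMapGuard {α β : Type} (p : α → Prop) [DecidablePred p] (F : α → β) (l : List α) :
    l.filterMap (fun x => if p x then none else some (F x)) =
      (l.filter (fun x => !decide (p x))).map F := by
  induction l with
  | nil => rfl
  | cons x xs ih =>
    by_cases h : p x <;> simp [h, ih]

theorem pvFilterMapRestrict {α β : Type} (p : α → Bool) (f : α → Option β) (l : List α)
    (h : ∀ x ∈ l, p x = true → f x = none) :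
    l.filterMap f = (l.filter (fun x => !p x)).filterMap f := by
  induction l with
  | nil => rfl
  | cons x xs ih =>
    have ih' := ih (fun y hy => h y (List.mem_cons_of_mem _ hy))
    by_cases hx : p x
    · simp [hx, h x List.mem_cons_self hx, ih']
    · simp only [Bool.not_eq_true] at hx
      simp [List.filterMap_cons, hx, ih']

-- sorted2 with a two-component key is sorted with the lexicographic key
theorem pvSorted2Lex {α κ₁ κ₂ : Type} [LinearOrder κ₁] [LinearOrder κ₂]
    (xs : List α) (k1 : α → κ₁) (k2 : α → κ₂) :
    PySem.List.sorted2 xs k1 k2 =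
      PySem.List.sorted xs (fun x => (toLex (k1 x, k2 x) : Lex (κ₁ × κ₂))) := by
  unfold PySem.List.sorted2 PySem.List.sorted
  simp only [if_neg (by decide : ¬ (false = true))]
  congr 1
  funext acc x
  congr 1
  funext a b
  rcases lt_trichotomy (k1 a) (k1 b) with h | h | h
  · simp [Prod.Lex.lt_iff, h]
  · simp [Prod.Lex.lt_iff, h]
  · simp [Prod.Lex.lt_iff, lt_asymm h, ne_of_gt h, not_le_of_gt h]

theorem pvPos_get? (k : String) (i : Int) :
    pvPos.get? k = some i ↔ (i, k) ∈ PySem.List.enumerate pvOrder := by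
  unfold pvPos
  rw [PySem.Dict.get?_eq_some_iff_mem_items _ _ _ (PySem.Dict.nodup_keys_ofList _)]
  rw [show (PySem.Dict.ofList ((PySem.List.enumerate pvOrder).map (fun p => (p.2, p.1)))).items
        = (PySem.List.enumerate pvOrder).map (fun p => (p.2, p.1)) from rfl]
  rw [List.mem_map]
  constructor
  · rintro ⟨p, hp, hpe⟩
    rw [Prod.mk.injEq] at hpe
    have : p = (i, k) := by rw [Prod.ext_iff]; exact ⟨hpe.2, hpe.1⟩
    rwa [this] at hp
  · intro hm
    exact ⟨(i, k), hm, rfl⟩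

theorem pvPos_none {k : String} (h : k ∉ pvOrder) : pvPos.get? k = none := by
  cases hc : pvPos.get? k with
  | none => rfl
  | some i =>
    exfalso
    apply h
    have hm := (pvPos_get? k i).mp hc
    have := List.mem_map_of_mem (f := fun p => p.2) hm
    rwa [PySem.List.map_snd_enumerate] at this

theorem pvPos_some_of_mem {k : String} (h : k ∈ pvOrder) : ∃ i, pvPos.get? k = some i := by
  rw [← PySem.List.map_snd_enumerate pvOrder 0] at h
  obtain ⟨p, hp, rfl⟩ := List.mem_map.mp h
  exact ⟨p.1, (pvPos_get? _ _).mpr hp⟩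

theorem pvEnum_inj {i : Int} {k k' : String} (h : (i, k) ∈ PySem.List.enumerate pvOrder)
    (h' : (i, k') ∈ PySem.List.enumerate pvOrder) : k = k' := by
  rw [PySem.List.mem_enumerate_iff] at h h'
  obtain ⟨a, ha, hpa⟩ := h
  obtain ⟨b, hb, hpb⟩ := h'
  rw [Prod.mk.injEq] at hpa hpb
  have : a = b := by omega
  subst this
  rw [hpa.2, hpb.2]

theorem pvEnum_lt {i : Int} {k : String} (h : (i, k) ∈ PySem.List.enumerate pvOrder) :
    i < (pvOrder.length : Int) := by
  rw [PySem.List.mem_enumerate_iff] at h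
  obtain ⟨a, ha, hpa⟩ := h
  rw [Prod.mk.injEq] at hpa
  omega

theorem pvEntry_eq_some (kv : String × String)
    (b : (Int × String) × String) :
    pvEntry kv = some b ↔ PySem.Str.strip kv.2 ≠ "" ∧
      ((pvPos.get? kv.1 = none ∧
          b = (((pvOrder.length : Int), kv.1), kv.1 ++ ": " ++ PySem.Str.strip kv.2)) ∨
        ∃ i, pvPos.get? kv.1 = some i ∧
          b = ((i, ""), pvLabel kv.1 ++ ": " ++ PySem.Str.strip kv.2)) := by
  unfold pvEntry
  by_cases h2 : PySem.Str.strip kv.2 = "" <;>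
    cases hp : pvPos.get? kv.1 <;> simp [h2, eq_comm]

theorem pvEntry_inj {kv kv' : String × String}
    {b b' : (Int × String) × String} (hne : kv.1 ≠ kv'.1)
    (h : pvEntry kv = some b) (h' : pvEntry kv' = some b') : b ≠ b' := by
  rw [pvEntry_eq_some] at h h'
  rcases h.2 with ⟨hp, rfl⟩ | ⟨i, hp, rfl⟩ <;> rcases h'.2 with ⟨hp', rfl⟩ | ⟨i', hp', rfl⟩ <;>
      intro hbb <;> simp only [Prod.mk.injEq] at hbb
  · exact hne hbb.1.2
  · have := pvEnum_lt ((pvPos_get? _ _).mp hp')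
    omega
  · have := pvEnum_lt ((pvPos_get? _ _).mp hp)
    omega
  · have hii : i = i' := hbb.1.1
    subst hii
    exact hne (pvEnum_inj ((pvPos_get? _ _).mp hp) ((pvPos_get? _ _).mp hp'))

theorem pvStripEmpty : PySem.Str.strip "" = "" := rfl

theorem pvPwTE1 (d : PySem.Dict String String) :
    List.Pairwise (fun a b => pvKey a < pvKey b)
      ((PySem.List.enumerate pvOrder).filterMap (pvGOrd d)) := by
  rw [show pvGOrd d = (fun p : Int × String =>
        if PySem.Str.strip (d.getD p.2 "") = "" then none
        else some (((p.1, ""), pvLabel p.2 ++ ": " ++ PySem.Str.strip (d.getD p.2 ""))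
          : (Int × String) × String)) from rfl,
      pvFilterMapGuard]
  rw [List.pairwise_map]
  apply List.Pairwise.sublist (List.filter_sublist)
  apply (PySem.List.pairwise_lt_enumerate pvOrder 0).imp
  intro p q hlt
  unfold pvKey
  rw [Prod.Lex.lt_iff]
  exact Or.inl hlt

theorem pvNdTE1 (d : PySem.Dict String String) :
    ((PySem.List.enumerate pvOrder).filterMap (pvGOrd d)).Nodup :=
  (pvPwTE1 d).imp (fun hlt => by intro he; subst he; exact absurd hlt (lt_irrefl _))

theorem pvNdQ1 (d : PySem.Dict String String) (hnd : d.keys.Nodup) :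
    ((d.items.filter (fun kv => decide (kv.1 ∈ pvOrder))).filterMap pvEntry).Nodup := by
  apply List.pairwise_filterMap.mpr
  have h1 : (d.items.map Prod.fst).Nodup := hnd
  have h2 : List.Pairwise (fun a b : String × String => a.1 ≠ b.1) d.items :=
    List.pairwise_map.mp h1
  exact (List.Pairwise.sublist (List.filter_sublist) h2).imp
    (fun hne b hb b' hb' => pvEntry_inj hne hb hb')

theorem pvMem1 (d : PySem.Dict String String) (hnd : d.keys.Nodup)
    (x : (Int × String) × String) :
    x ∈ (PySem.List.enumerate pvOrder).filterMap (pvGOrd d) ↔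
      x ∈ (d.items.filter (fun kv => decide (kv.1 ∈ pvOrder))).filterMap pvEntry := by
  rw [List.mem_filterMap, List.mem_filterMap]
  constructor
  · rintro ⟨p, hp, hg⟩
    unfold pvGOrd at hg
    by_cases hc : PySem.Str.strip (d.getD p.2 "") = ""
    · simp [hc] at hg
    rw [if_neg hc, Option.some.injEq] at hg
    cases hgv : d.get? p.2 with
    | none =>
      exfalso
      apply hc
      rw [PySem.Dict.getD_eq_get?_getD, hgv]
      exact pvStripEmpty
    | some v =>
      have hgd : d.getD p.2 "" = v := by rw [PySem.Dict.getD_eq_get?_getD, hgv]; rfl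
      refine ⟨(p.2, v), ?_, ?_⟩
      · rw [List.mem_filter]
        refine ⟨PySem.Dict.mem_items_of_get?_eq_some d hgv, ?_⟩
        have : p.2 ∈ pvOrder := by
          rw [← PySem.List.map_snd_enumerate pvOrder 0]
          exact List.mem_map_of_mem hp
        simpa using this
      · rw [pvEntry_eq_some]
        rw [hgd] at hc hg
        refine ⟨hc, Or.inr ⟨p.1, ?_, ?_⟩⟩
        · exact (pvPos_get? _ _).mpr (by simpa using hp)
        · exact hg.symm
  · rintro ⟨kv, hkv, he⟩
    rw [List.mem_filter] at hkv
    have hmem : kv.1 ∈ pvOrder := by simpa using hkv.2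
    rw [pvEntry_eq_some] at he
    rcases he.2 with ⟨hpn, rfl⟩ | ⟨i, hpi, rfl⟩
    · obtain ⟨j, hj⟩ := pvPos_some_of_mem hmem
      rw [hpn] at hj
      exact absurd hj (by simp)
    · have hp : (i, kv.1) ∈ PySem.List.enumerate pvOrder := (pvPos_get? _ _).mp hpi
      refine ⟨(i, kv.1), hp, ?_⟩
      have hget : d.get? kv.1 = some kv.2 :=
        (PySem.Dict.get?_eq_some_iff_mem_items d _ _ hnd).mpr (by simpa using hkv.1)
      have hgd : d.getD kv.1 "" = kv.2 := by rw [PySem.Dict.getD_eq_get?_getD, hget]; rfl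
      unfold pvGOrd
      simp only [hgd]
      rw [if_neg he.1]

theorem pvPerm1 (d : PySem.Dict String String) (hnd : d.keys.Nodup) :
    ((PySem.List.enumerate pvOrder).filterMap (pvGOrd d)).Perm
      ((d.items.filter (fun kv => decide (kv.1 ∈ pvOrder))).filterMap pvEntry) :=
  (List.perm_ext_iff_of_nodup (pvNdTE1 d) (pvNdQ1 d hnd)).mpr (pvMem1 d hnd)

theorem pvEntry_eq_gOth (kv : String × String)
    (hmem : kv.1 ∉ pvOrder) : pvEntry kv = pvGOth kv := by
  unfold pvEntry pvGOth
  rw [pvPos_none hmem]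
  by_cases hc : PySem.Str.strip kv.2 = "" <;> simp [hc, hmem]

theorem pvPerm2 (d : PySem.Dict String String) :
    ((PySem.List.sorted2 d.items Prod.fst Prod.snd).filterMap pvGOth).Perm
      ((d.items.filter (fun kv => !decide (kv.1 ∈ pvOrder))).filterMap pvEntry) := by
  have e1 : (d.items.filter (fun kv => !decide (kv.1 ∈ pvOrder))).filterMap pvEntry =
      (d.items.filter (fun kv => !decide (kv.1 ∈ pvOrder))).filterMap pvGOth :=
    List.filterMap_congr (fun kv hkv =>
      pvEntry_eq_gOth kv (by simpa using (List.mem_filter.mp hkv).2))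
  have e2 : d.items.filterMap pvGOth =
      (d.items.filter (fun kv => !decide (kv.1 ∈ pvOrder))).filterMap pvGOth :=
    pvFilterMapRestrict _ pvGOth d.items (fun kv _ hkv => by
      unfold pvGOth
      simp only [decide_eq_true_eq] at hkv
      simp [hkv])
  rw [e1, ← e2]
  exact (PySem.List.sorted2_perm d.items Prod.fst Prod.snd false).filterMap pvGOth

theorem pvPwTE2 (d : PySem.Dict String String) (hnd : d.keys.Nodup) :
    List.Pairwise (fun a b => pvKey a < pvKey b)
      ((PySem.List.sorted2 d.items Prod.fst Prod.snd).filterMap pvGOth) := by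
  have hS' : PySem.List.sorted2 d.items Prod.fst Prod.snd =
      PySem.List.sorted d.items
        (fun kv : String × String =>
          (toLex (Prod.fst kv, Prod.snd kv) : Lex (String × String))) :=
    pvSorted2Lex d.items Prod.fst Prod.snd
  have hle : List.Pairwise
      (fun a b : String × String =>
        (toLex (Prod.fst a, Prod.snd a) : Lex (String × String)) ≤
          toLex (Prod.fst b, Prod.snd b))
      (PySem.List.sorted2 d.items Prod.fst Prod.snd) := by
    rw [hS']
    exact PySem.List.sorted_pairwise d.items _
  have hperm : (PySem.List.sorted2 d.items Prod.fst Prod.snd).Perm d.items :=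
    PySem.List.sorted2_perm d.items Prod.fst Prod.snd false
  have h1 : (d.items.map Prod.fst).Nodup := hnd
  have hmapnd : ((PySem.List.sorted2 d.items Prod.fst Prod.snd).map Prod.fst).Nodup :=
    ((hperm.map Prod.fst).nodup_iff).mpr h1
  have hne : List.Pairwise (fun a b : String × String => a.1 ≠ b.1)
      (PySem.List.sorted2 d.items Prod.fst Prod.snd) := List.pairwise_map.mp hmapnd
  have hlt1 : List.Pairwise (fun a b : String × String => a.1 < b.1)
      (PySem.List.sorted2 d.items Prod.fst Prod.snd) :=
    (hle.and hne).imp (fun h => by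
      rcases Prod.Lex.le_iff.mp h.1 with hl | ⟨heq, _⟩
      · exact hl
      · exact absurd heq h.2)
  rw [show pvGOth = (fun kv : String × String =>
        if kv.1 ∈ pvOrder ∨ PySem.Str.strip kv.2 = "" then none
        else some ((((pvOrder.length : Int), kv.1), kv.1 ++ ": " ++ PySem.Str.strip kv.2)
          : (Int × String) × String)) from rfl,
      pvFilterMapGuard]
  rw [List.pairwise_map]
  apply List.Pairwise.sublist (List.filter_sublist)
  apply hlt1.imp
  intro a b hlt
  unfold pvKey
  rw [Prod.Lex.lt_iff]
  exact Or.inr ⟨rfl, hlt⟩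

theorem pvCross (d : PySem.Dict String String)
    (a b : (Int × String) × String)
    (ha : a ∈ (PySem.List.enumerate pvOrder).filterMap (pvGOrd d))
    (hb : b ∈ (PySem.List.sorted2 d.items Prod.fst Prod.snd).filterMap pvGOth) :
    pvKey a < pvKey b := by
  rw [List.mem_filterMap] at ha hb
  obtain ⟨p, hp, hgp⟩ := ha
  obtain ⟨kv, _, hgkv⟩ := hb
  unfold pvGOrd at hgp
  unfold pvGOth at hgkv
  by_cases hc : PySem.Str.strip (d.getD p.2 "") = ""
  · simp [hc] at hgp
  by_cases hc' : kv.1 ∈ pvOrder ∨ PySem.Str.strip kv.2 = ""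
  · simp [hc'] at hgkv
  rw [if_neg hc, Option.some.injEq] at hgp
  rw [if_neg hc', Option.some.injEq] at hgkv
  have hlt : p.1 < (pvOrder.length : Int) := pvEnum_lt (by simpa using hp)
  rw [← hgp, ← hgkv]
  unfold pvKey
  rw [Prod.Lex.lt_iff]
  exact Or.inl hlt

theorem pvMapSnd1 (d : PySem.Dict String String) :
    ∀ (l : List String) (s : Int),
      ((PySem.List.enumerate l s).filterMap (pvGOrd d)).map (fun e => e.2) =
        l.filterMap (pvLine1 d) := by
  intro l
  induction l with
  | nil => intro s; rfl
  | cons k ks ih =>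
    intro s
    rw [PySem.List.enumerate_cons, List.filterMap_cons, List.filterMap_cons]
    by_cases hc : PySem.Str.strip (d.getD k "") = ""
    · rw [show pvGOrd d (s, k) = none from by simp [pvGOrd, hc],
        show pvLine1 d k = none from by simp [pvLine1, hc]]
      exact ih (s + 1)
    · rw [show pvGOrd d (s, k) =
            some ((s, ""), pvLabel k ++ ": " ++ PySem.Str.strip (d.getD k "")) from by
          simp [pvGOrd, hc],
        show pvLine1 d k = some (pvLabel k ++ ": " ++ PySem.Str.strip (d.getD k "")) from by
          simp [pvLine1, hc],
        List.map_cons, ih (s + 1)]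

theorem pvMapSnd2 (l : List (String × String)) :
    (l.filterMap pvGOth).map (fun e => e.2) = l.filterMap pvLine2 := by
  rw [List.map_filterMap]
  exact List.filterMap_congr (fun kv _ => by
    unfold pvGOth pvLine2
    by_cases hc : kv.1 ∈ pvOrder ∨ PySem.Str.strip kv.2 = "" <;> simp [hc])

theorem pvMain (row : List (String × String)) :
    csv_description_py row = csv_description_py_alt row := by
  have hnd : (PySem.Dict.ofList row).keys.Nodup := PySem.Dict.nodup_keys_ofList row
  have hA : csv_description_py row =
      PySem.Str.slice (PySem.Str.join "\n"
        (pvOrder.filterMap (pvLine1 (PySem.Dict.ofList row)) ++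
          (PySem.List.sorted2 (PySem.Dict.ofList row).items Prod.fst Prod.snd).filterMap
            pvLine2)) none (some 65000) := by
    simp only [csv_description_py]
    rw [pvFoldlOpt pvLine2 _ ?h2, pvFoldlOpt (pvLine1 (PySem.Dict.ofList row)) _ ?h1]
    · rw [List.nil_append]
    case h1 =>
      intro es k
      by_cases hc : PySem.Str.strip ((PySem.Dict.ofList row).getD k "") = "" <;>
        simp [pvLine1, hc]
    case h2 =>
      intro es kv
      by_cases hc : kv.1 ∈ pvOrder ∨ PySem.Str.strip kv.2 = "" <;> simp [pvLine2, hc]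
  have hB : csv_description_py_alt row =
      PySem.Str.slice (PySem.Str.join "\n"
        ((PySem.List.sorted2
            ((PySem.Dict.ofList row).items.filterMap pvEntry)
            (fun e => e.1.1) (fun e => e.1.2)).map (fun e => e.2))) none (some 65000) := by
    simp only [csv_description_py_alt]
    rw [pvFoldlOpt pvEntry _ ?hb]
    · rw [List.nil_append]
    case hb =>
      intro es kv
      by_cases hc : PySem.Str.strip kv.2 = ""
      · simp [pvEntry, hc]
      · rw [show PySem.Dict.ofList ((PySem.List.enumerate pvOrder).map (fun p => (p.2, p.1)))
              = pvPos from rfl]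
        cases hp : pvPos.get? kv.1 <;> simp [pvEntry, hc, hp]
  have hperm : ((PySem.List.enumerate pvOrder).filterMap (pvGOrd (PySem.Dict.ofList row)) ++
      (PySem.List.sorted2 (PySem.Dict.ofList row).items Prod.fst Prod.snd).filterMap
        pvGOth).Perm
      ((PySem.Dict.ofList row).items.filterMap pvEntry) := by
    refine ((pvPerm1 _ hnd).append (pvPerm2 _)).trans ?_
    rw [← List.filterMap_append]
    exact (List.filter_append_perm _ _).filterMap _
  have hpw : List.Pairwise (fun a b => pvKey a < pvKey b)
      ((PySem.List.enumerate pvOrder).filterMap (pvGOrd (PySem.Dict.ofList row)) ++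
        (PySem.List.sorted2 (PySem.Dict.ofList row).items Prod.fst Prod.snd).filterMap
          pvGOth) :=
    List.pairwise_append.mpr
      ⟨pvPwTE1 _, pvPwTE2 _ hnd, fun a ha b hb => pvCross _ a b ha hb⟩
  have hsorted : PySem.List.sorted2
      ((PySem.Dict.ofList row).items.filterMap pvEntry)
      (fun e => e.1.1) (fun e => e.1.2) =
      (PySem.List.enumerate pvOrder).filterMap (pvGOrd (PySem.Dict.ofList row)) ++
        (PySem.List.sorted2 (PySem.Dict.ofList row).items Prod.fst Prod.snd).filterMap
          pvGOth := by
    have hb : PySem.List.sorted2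
        ((PySem.Dict.ofList row).items.filterMap pvEntry)
        (fun e => e.1.1) (fun e => e.1.2) =
        PySem.List.sorted
          ((PySem.Dict.ofList row).items.filterMap pvEntry)
          pvKey :=
      pvSorted2Lex _ _ _
    rw [hb]
    exact PySem.List.sorted_eq_of_perm_of_pairwise_lt _ _ pvKey hperm hpw
  rw [hA, hB, hsorted, List.map_append, pvMapSnd1 _ pvOrder 0, pvMapSnd2]

-- ===== VERDICT (by name: the statement is the Claim_ definition above) =====
theorem csv_description_py_spec : Claim_equal_csv_description_py := by
  intro row _
  show csv_description_py row = csv_description_py_alt row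
  exact pvMain row
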